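-- pv_equiv track=rewrite | github.com/brainiax-developers/callminer-bulk-pipeline | src/CallMinerBulkApiSchedulerLambda.py | merge_duration
-- ===== SOURCE A (Python) =====
-- from typing import Any, Dict, List, Optional, Tuple
--
-- ALL_DURATION_KEYS = {
--     "SearchMode",
--     "LastNDays",
--     "LastNHours",
--     "TimeFrame",
--     "StartDate",
--     "EndDate",
-- }
--
-- def merge_duration(template_duration: Dict[str, Any], duration_override: Dict[str, Any]) -> Dict[str, Any]:
--     merged = {key: None for key in ALL_DURATION_KEYS}
--
--     if isinstance(template_duration, dict):
--         for key in ALL_DURATION_KEYS: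
--             if key in template_duration:
--                 merged[key] = template_duration[key]
--
--     for key, value in duration_override.items():
--         merged[key] = value
--
--     has_start = duration_override.get("StartDate") not in (None, "")
--     has_end = duration_override.get("EndDate") not in (None, "")
--     has_timeframe = duration_override.get("TimeFrame") not in (None, "")
--     has_days = duration_override.get("LastNDays") not in (None, "")
--     has_hours = duration_override.get("LastNHours") not in (None, "")
--
--     if has_start or has_end:
--         merged["LastNDays"] = None
--         merged["LastNHours"] = None
--         merged["TimeFrame"] = None
--     elif has_timeframe:
--         merged["StartDate"] = None
--         merged["EndDate"] = None
--         merged["LastNDays"] = None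
--         merged["LastNHours"] = None
--     elif has_hours:
--         merged["LastNDays"] = None
--         merged["TimeFrame"] = None
--         merged["StartDate"] = None
--         merged["EndDate"] = None
--     elif has_days:
--         merged["LastNHours"] = None
--         merged["TimeFrame"] = None
--         merged["StartDate"] = None
--         merged["EndDate"] = None
--
--     return merged
-- ===== SOURCE B (Python) =====
-- _LEVEL = {"StartDate": 1, "EndDate": 1, "TimeFrame": 2, "LastNHours": 3, "LastNDays": 4}
-- _ORDER = ("SearchMode", "LastNDays", "LastNHours", "TimeFrame", "StartDate", "EndDate")
--
--
-- def merge_duration(template_duration, duration_override):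
--     def present(k):
--         return duration_override.get(k) not in (None, "")
--
--     winner = min((lv for k, lv in _LEVEL.items() if present(k)), default=0)
--
--     def value(k):
--         lv = _LEVEL.get(k, 0)
--         if winner and lv and lv != winner:
--             return None
--         if k in duration_override:
--             return duration_override[k]
--         return template_duration.get(k)
--
--     out = {k: value(k) for k in _ORDER}
--     for k, v in duration_override.items():
--         if k not in out:
--             out[k] = v
--     return out
-- ===== Notes on version B (the rewrite author's own statement) =====
-- stated objective: alternative
-- what changed: Replaces A's merge-then-destructively-null if/elif chain with a numeric precedence scheme: the winning precedence level is computed once as a min over the override's present duration keys, and each key's final value is then computed directly by comparing its own level to the winner - no interim merged dict is built and then nulled.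
import Mathlib
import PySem

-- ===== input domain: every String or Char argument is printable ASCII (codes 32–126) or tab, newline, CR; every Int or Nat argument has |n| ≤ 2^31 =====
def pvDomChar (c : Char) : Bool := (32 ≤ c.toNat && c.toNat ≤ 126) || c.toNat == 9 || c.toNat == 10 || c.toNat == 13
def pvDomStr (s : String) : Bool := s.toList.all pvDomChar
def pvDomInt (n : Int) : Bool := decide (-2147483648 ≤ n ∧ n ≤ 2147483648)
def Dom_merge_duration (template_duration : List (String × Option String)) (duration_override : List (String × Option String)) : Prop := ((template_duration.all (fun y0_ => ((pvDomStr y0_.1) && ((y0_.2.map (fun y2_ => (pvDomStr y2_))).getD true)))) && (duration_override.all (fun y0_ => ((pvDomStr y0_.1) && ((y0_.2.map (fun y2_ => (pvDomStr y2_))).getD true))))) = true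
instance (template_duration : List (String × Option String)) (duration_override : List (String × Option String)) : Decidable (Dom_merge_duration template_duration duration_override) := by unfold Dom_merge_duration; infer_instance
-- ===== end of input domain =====

-- B replaces A's merge-then-destructively-null if/elif chain with numeric precedence levels:
-- the winning level is a min over present override keys, and each key's final value is computed
-- directly by comparing its level to the winner (objective: alternative; same cost).


-- ===== PORT A =====
-- ALL_DURATION_KEYS is a Python set; its iteration order is fixed here (outputs are dicts,
-- compared ignoring order).
def pvAllDurationKeys : List String :=
  ["SearchMode", "LastNDays", "LastNHours", "TimeFrame", "StartDate", "EndDate"]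

-- `… not in (None, "")`
def pvTruthy (v : Option (Option String)) : Bool :=
  match v.getD none with
  | none => false
  | some s => s != ""

def merge_duration (template_duration : List (String × Option String)) (duration_override : List (String × Option String)) : List (String × Option String) :=
  let td := PySem.Dict.ofList template_duration
  let dd := PySem.Dict.ofList duration_override
  let merged := pvAllDurationKeys.foldl (fun m k => m.insert k none) PySem.Dict.empty
  -- `isinstance(template_duration, dict)` is always true for a dict-typed argument
  let merged := pvAllDurationKeys.foldl
    (fun m k => if td.contains k then m.insert k (td.getD k none) else m) merged
  let merged := dd.items.foldl (fun m p => m.insert p.1 p.2) merged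
  let has_start := pvTruthy (dd.get? "StartDate")
  let has_end := pvTruthy (dd.get? "EndDate")
  let has_timeframe := pvTruthy (dd.get? "TimeFrame")
  let has_days := pvTruthy (dd.get? "LastNDays")
  let has_hours := pvTruthy (dd.get? "LastNHours")
  let merged :=
    if has_start || has_end then
      ((merged.insert "LastNDays" none).insert "LastNHours" none).insert "TimeFrame" none
    else if has_timeframe then
      (((merged.insert "StartDate" none).insert "EndDate" none).insert "LastNDays" none).insert "LastNHours" none
    else if has_hours then
      (((merged.insert "LastNDays" none).insert "TimeFrame" none).insert "StartDate" none).insert "EndDate" none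
    else if has_days then
      (((merged.insert "LastNHours" none).insert "TimeFrame" none).insert "StartDate" none).insert "EndDate" none
    else merged
  merged.items

-- ===== PORT B =====
-- _LEVEL: the precedence level of each mutually-exclusive duration key
def pvLevelTable : List (String × Nat) :=
  [("StartDate", 1), ("EndDate", 1), ("TimeFrame", 2), ("LastNHours", 3), ("LastNDays", 4)]

-- _ORDER
def pvOrderB : List String :=
  ["SearchMode", "LastNDays", "LastNHours", "TimeFrame", "StartDate", "EndDate"]

def merge_duration_alt (template_duration : List (String × Option String)) (duration_override : List (String × Option String)) : List (String × Option String) :=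
  let td := PySem.Dict.ofList template_duration
  let dd := PySem.Dict.ofList duration_override
  -- winner = min((lv for k, lv in _LEVEL.items() if present(k)), default=0)
  let winner : Nat :=
    ((pvLevelTable.filter (fun p => pvTruthy (dd.get? p.1))).map (fun p => p.2)).min?.getD 0
  let lvl := PySem.Dict.ofList pvLevelTable
  let value : String → Option String := fun k =>
    let lv := lvl.getD k 0
    if winner ≠ 0 ∧ lv ≠ 0 ∧ lv ≠ winner then none
    else if dd.contains k then dd.getD k none
    else td.getD k none
  let out := pvOrderB.map (fun k => (k, value k))
  dd.items.foldl (fun acc p => if acc.any (fun q => q.1 == p.1) then acc else acc ++ [p]) out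

-- ===== PRECONDITION & SPEC =====
def Spec_merge_duration (template_duration : List (String × Option String)) (duration_override : List (String × Option String)) (out : List (String × Option String)) : Prop := out = merge_duration_alt template_duration duration_override
instance (template_duration : List (String × Option String)) (duration_override : List (String × Option String)) (out : List (String × Option String)) : Decidable (Spec_merge_duration template_duration duration_override out) := by unfold Spec_merge_duration; infer_instance

-- ===== CLAIM (what is proved, stated in full; the proofs are below) =====
def Claim_equal_merge_duration : Prop := ∀ (template_duration : List (String × Option String)) (duration_override : List (String × Option String)), Dom_merge_duration template_duration duration_override → Spec_merge_duration template_duration duration_override (merge_duration template_duration duration_override)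

-- ===== LEMMAS AND PROOFS =====

-- A chain of none-inserts at present keys equals one map nulling those keys.
lemma pvInsStep (m : PySem.Dict String (Option String)) (a k : String)
    (hk : m.contains k = true) : (m.insert a none).contains k = true := by
  simp [PySem.Dict.contains_insert, hk]

lemma pvNullItems : ∀ (ks : List String) (M : PySem.Dict String (Option String)),
    (∀ k ∈ ks, M.contains k = true) →
    (ks.foldl (fun m k => m.insert k none) M).items
      = M.items.map (fun p => if ks.contains p.1 then (p.1, (none : Option String)) else p)
  | [], M, _ => by simp
  | k :: rest, M, h => by
    rw [List.foldl_cons,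
      pvNullItems rest _ (fun x hx => pvInsStep M k x (h x (List.mem_cons_of_mem _ hx))),
      PySem.Dict.items_insert_of_contains M none (h k List.mem_cons_self), List.map_map]
    apply List.map_congr_left
    rintro ⟨a, v⟩ _
    by_cases hak : a = k
    · subst hak; by_cases hr : rest.contains a = true <;> simp
    · simp [hak]

-- Inserting every key of a fresh list from empty: the items are exactly that list.
lemma pvInitItems (ks : List String) (hnd : ks.Nodup) :
    (ks.foldl (fun m k => m.insert k (none : Option String)) PySem.Dict.empty).items
      = ks.map (fun k => (k, (none : Option String))) := by
  have := PySem.Dict.items_foldl_insert_fresh (l := ks) (k := id)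
    (v := fun _ => (none : Option String)) (d := PySem.Dict.empty)
    (by intro a _; simp [PySem.Dict.contains_empty]) (by simpa using hnd)
  simpa using this

-- Conditional pointwise overlay of keys already present.
lemma pvUpdItems (c : String → Bool) (v : String → Option String) :
    ∀ (ks : List String) (M : PySem.Dict String (Option String)),
      (∀ k ∈ ks, M.contains k = true) →
      (ks.foldl (fun m k => if c k then m.insert k (v k) else m) M).items
        = M.items.map (fun p => if p.1 ∈ ks ∧ c p.1 then (p.1, v p.1) else p)
  | [], M, _ => by simp
  | k :: ks, M, h => by
    rw [List.foldl_cons]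
    by_cases hck : c k = true
    · rw [if_pos hck]
      rw [pvUpdItems c v ks _ (by
        intro x hx
        simp [PySem.Dict.contains_insert, h x (List.mem_cons_of_mem _ hx)]),
        PySem.Dict.items_insert_of_contains M (v k) (h k List.mem_cons_self), List.map_map]
      apply List.map_congr_left
      rintro ⟨a, w⟩ _
      by_cases hak : a = k
      · subst hak
        by_cases hm : a ∈ ks <;> simp [hck, hm]
      · simp [hak]
    · rw [if_neg hck]
      rw [pvUpdItems c v ks M (fun x hx => h x (List.mem_cons_of_mem _ hx))]
      apply List.map_congr_left
      rintro ⟨a, w⟩ _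
      by_cases hak : a = k
      · subst hak; simp [hck]
      · simp [hak]

-- A dict-update loop over pairs with distinct keys: overlay existing keys, append the rest.
lemma pvMergeItems :
    ∀ (L : List (String × Option String)) (M : PySem.Dict String (Option String)),
      (L.map Prod.fst).Nodup → M.keys.Nodup →
      (L.foldl (fun m p => m.insert p.1 p.2) M).items
        = M.items.map (fun q => (q.1, ((PySem.Dict.mk L).get? q.1).getD q.2))
          ++ L.filter (fun p => !(M.contains p.1))
  | [], M, _, _ => by
    simp [PySem.Dict.get?]
  | (k0, v0) :: L, M, hL, hM => by
    rw [List.foldl_cons]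
    have hL2 : (k0 :: L.map Prod.fst).Nodup := by simpa using hL
    have hLk : k0 ∉ L.map Prod.fst := (List.nodup_cons.mp hL2).1
    have hL' : (L.map Prod.fst).Nodup := (List.nodup_cons.mp hL2).2
    have hgetL : (PySem.Dict.mk L).get? k0 = none := by
      rw [PySem.Dict.get?_eq_none_iff_not_mem_keys]
      simpa [PySem.Dict.keys_mk] using hLk
    by_cases hc : M.contains k0 = true
    · rw [pvMergeItems L _ hL' (by
        simpa using PySem.Dict.nodup_keys_insert M k0 v0 hM)]
      rw [PySem.Dict.items_insert_of_contains M v0 hc, List.map_map]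
      have hmap : ∀ q ∈ M.items,
          ((fun q => (q.1, ((PySem.Dict.mk L).get? q.1).getD q.2)) ∘
            fun q => if q.1 == k0 then (k0, v0) else q) q
          = (q.1, ((PySem.Dict.mk ((k0, v0) :: L)).get? q.1).getD q.2) := by
        rintro ⟨a, w⟩ _
        by_cases hap : a = k0
        · subst hap; simp [PySem.Dict.get?_mk_cons, hgetL]
        · have h2 : (k0 == a) = false := beq_eq_false_iff_ne.mpr (fun h => hap h.symm)
          simp [PySem.Dict.get?_mk_cons, hap, h2]
      rw [List.map_congr_left hmap]
      congr 1
      rw [show (((k0, v0) :: L).filter (fun p' => !(M.contains p'.1)))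
            = L.filter (fun p' => !(M.contains p'.1)) by simp [List.filter_cons, hc]]
      apply List.filter_congr
      rintro ⟨a, w⟩ ha
      have hmem : a ∈ L.map Prod.fst := List.mem_map_of_mem (f := Prod.fst) ha
      have hap : (a == k0) = false := beq_eq_false_iff_ne.mpr (fun h => hLk (h ▸ hmem))
      simp [PySem.Dict.contains_insert, hap]
    · rw [pvMergeItems L _ hL' (by
        simpa using PySem.Dict.nodup_keys_insert M k0 v0 hM)]
      rw [PySem.Dict.items_insert_of_not_contains M v0 (by simpa using hc)]
      rw [List.map_append]
      have hmap : ∀ q ∈ M.items,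
          (fun q => (q.1, ((PySem.Dict.mk L).get? q.1).getD q.2)) q
          = (q.1, ((PySem.Dict.mk ((k0, v0) :: L)).get? q.1).getD q.2) := by
        rintro ⟨a, w⟩ ha
        have hak : a ∈ M.keys := by
          simpa [PySem.Dict.keys] using List.mem_map_of_mem (f := Prod.fst) ha
        have hca : M.contains a = true := (PySem.Dict.contains_iff_mem_keys M a).mpr hak
        have hap : (k0 == a) = false := beq_eq_false_iff_ne.mpr (fun h => hc (h ▸ hca))
        simp [PySem.Dict.get?_mk_cons, hap]
      rw [List.map_congr_left hmap]
      rw [show (((k0, v0) :: L).filter (fun p' => !(M.contains p'.1)))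
            = (k0, v0) :: L.filter (fun p' => !(M.contains p'.1)) by
          simp [List.filter_cons, hc]]
      have hfilter : (L.filter (fun p' => !((M.insert k0 v0).contains p'.1)))
          = L.filter (fun p' => !(M.contains p'.1)) := by
        apply List.filter_congr
        rintro ⟨a, w⟩ ha
        have hmem : a ∈ L.map Prod.fst := List.mem_map_of_mem (f := Prod.fst) ha
        have hap : (a == k0) = false := beq_eq_false_iff_ne.mpr (fun h => hLk (h ▸ hmem))
        simp [PySem.Dict.contains_insert, hap]
      rw [hfilter]
      simp [PySem.Dict.get?_mk_cons, hgetL]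
  termination_by L => L.length

-- B's append loop over pairs with distinct keys appends exactly the fresh ones.
lemma pvAppendFresh :
    ∀ (L acc : List (String × Option String)), (L.map Prod.fst).Nodup →
      L.foldl (fun a p => if a.any (fun q => q.1 == p.1) then a else a ++ [p]) acc
        = acc ++ L.filter (fun p => !(acc.any (fun q => q.1 == p.1)))
  | [], acc, _ => by simp
  | (k0, v0) :: L, acc, hL => by
    have hL2 : (k0 :: L.map Prod.fst).Nodup := by simpa using hL
    have hLk : k0 ∉ L.map Prod.fst := (List.nodup_cons.mp hL2).1
    have hL' : (L.map Prod.fst).Nodup := (List.nodup_cons.mp hL2).2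
    rw [List.foldl_cons]
    by_cases hc : acc.any (fun q => q.1 == k0) = true
    · rw [if_pos hc, pvAppendFresh L acc hL']
      simp [List.filter_cons, hc]
    · rw [if_neg hc, pvAppendFresh L (acc ++ [(k0, v0)]) hL']
      have hfilter : (L.filter (fun p' => !((acc ++ [(k0, v0)]).any (fun q => q.1 == p'.1))))
          = L.filter (fun p' => !(acc.any (fun q => q.1 == p'.1))) := by
        apply List.filter_congr
        rintro ⟨a, w⟩ ha
        have hmem : a ∈ L.map Prod.fst := List.mem_map_of_mem (f := Prod.fst) ha
        have hap : (k0 == a) = false := beq_eq_false_iff_ne.mpr (fun h => hLk (h ▸ hmem))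
        simp [List.any_append, hap]
      rw [hfilter]
      simp [List.filter_cons, hc, List.append_assoc]
  termination_by L => L.length

-- dd[k] when present vs getD-through-get?.
lemma pvBaseEq (dd td : PySem.Dict String (Option String)) (k : String) :
    ((dd.get? k).getD (td.getD k none))
      = if dd.contains k then dd.getD k none else td.getD k none := by
  rw [PySem.Dict.contains_eq_isSome_get?]
  cases h : dd.get? k <;> simp [PySem.Dict.getD_eq_get?_getD, h]

-- The min-over-present-levels equals A's if/elif winner.
lemma pvWinnerEq (cond : String → Bool) :
    ((pvLevelTable.filter (fun p => cond p.1)).map (fun p => p.2)).min?.getD 0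
      = (if cond "StartDate" || cond "EndDate" then 1
         else if cond "TimeFrame" then 2
         else if cond "LastNHours" then 3
         else if cond "LastNDays" then 4 else 0) := by
  simp only [pvLevelTable, List.filter]
  cases cond "StartDate" <;> cases cond "EndDate" <;> cases cond "TimeFrame" <;>
    cases cond "LastNHours" <;> cases cond "LastNDays" <;> rfl

-- any-over-a-keyed-map is a membership test on the keys
lemma pvAnyMapKey (f : String → Option String) (ks : List String) (a : String) :
    ((ks.map (fun k => (k, f k))).any (fun q => q.1 == a)) = ks.contains a := by
  rw [List.any_map]
  show (ks.any fun k => k == a) = _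
  exact List.any_beq'

lemma pvContainsMem (a : String) :
    pvOrderB.contains a = decide (a ∈ pvAllDurationKeys) := by
  simp [pvOrderB, pvAllDurationKeys, List.contains_cons]

-- one branch of A's null chain against B's per-key rule, for a fixed winner level w
lemma pvBranch (td dd M : PySem.Dict String (Option String)) (ks : List String) (w : Nat)
    (h2 : M.items = pvAllDurationKeys.map (fun k => (k, (dd.get? k).getD (td.getD k none)))
      ++ dd.items.filter (fun p => !(decide (p.1 ∈ pvAllDurationKeys))))
    (hMc : ∀ k ∈ pvAllDurationKeys, M.contains k = true)
    (hks : ∀ k ∈ ks, k ∈ pvAllDurationKeys)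
    (hsup : ∀ k ∈ pvAllDurationKeys, ks.contains k
      = decide (w ≠ 0 ∧ (PySem.Dict.ofList pvLevelTable).getD k 0 ≠ 0 ∧
                (PySem.Dict.ofList pvLevelTable).getD k 0 ≠ w)) :
    (ks.foldl (fun m k => m.insert k none) M).items
      = pvAllDurationKeys.map (fun k => (k,
          if w ≠ 0 ∧ (PySem.Dict.ofList pvLevelTable).getD k 0 ≠ 0 ∧
             (PySem.Dict.ofList pvLevelTable).getD k 0 ≠ w then none
          else if dd.contains k then dd.getD k none else td.getD k none))
        ++ dd.items.filter (fun p => !(decide (p.1 ∈ pvAllDurationKeys))) := by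
  rw [pvNullItems ks M (fun k hk => hMc k (hks k hk)), h2, List.map_append, List.map_map]
  congr 1
  · apply List.map_congr_left
    intro k hk
    show (if ks.contains k then _ else _) = _
    rw [hsup k hk, pvBaseEq]
    by_cases hP : (w ≠ 0 ∧ (PySem.Dict.ofList pvLevelTable).getD k 0 ≠ 0 ∧
        (PySem.Dict.ofList pvLevelTable).getD k 0 ≠ w)
    · simp [hP]
    · simp [hP]
  · have hid : ∀ p ∈ dd.items.filter (fun p => !(decide (p.1 ∈ pvAllDurationKeys))),
        (if ks.contains p.1 = true then (p.1, (none : Option String)) else p) = p := by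
      rintro ⟨a, v⟩ ha
      have hmem : ¬ a ∈ pvAllDurationKeys := by
        have := (List.mem_filter.mp ha).2
        simpa using this
      have hcs : ks.contains a = false := by
        cases hcs : ks.contains a
        · rfl
        · exact absurd (hks a (by simpa using hcs)) hmem
      rw [if_neg (by rw [hcs]; simp)]
    rw [List.map_congr_left hid]
    simp

lemma pvMain (t d : List (String × Option String)) :
    merge_duration t d = merge_duration_alt t d := by
  unfold merge_duration merge_duration_alt
  dsimp only
  set td := PySem.Dict.ofList t with htd
  set dd := PySem.Dict.ofList d with hdd
  -- characterize A's merged dict before the null chain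
  have hddnd : (dd.items.map Prod.fst).Nodup := by
    simpa [PySem.Dict.keys] using PySem.Dict.nodup_keys_ofList d
  have h0 := pvInitItems pvAllDurationKeys (by decide)
  set M0 := pvAllDurationKeys.foldl (fun m k => m.insert k (none : Option String)) PySem.Dict.empty with hM0
  have h0c : ∀ k ∈ pvAllDurationKeys, M0.contains k = true := by
    intro k hk
    rw [PySem.Dict.contains_eq_decide_mem_keys]
    simp only [PySem.Dict.keys, h0, List.map_map]
    simpa using hk
  set M1 := pvAllDurationKeys.foldl
    (fun m k => if td.contains k then m.insert k (td.getD k none) else m) M0 with hM1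
  have h1 : M1.items = pvAllDurationKeys.map (fun k => (k, td.getD k none)) := by
    rw [hM1, pvUpdItems (fun k => td.contains k) (fun k => td.getD k none) _ _ h0c, h0,
      List.map_map]
    apply List.map_congr_left
    intro k hk
    by_cases hc : td.contains k = true
    · simp [hk, hc]
    · have hz : td.getD k none = none :=
        PySem.Dict.getD_of_not_contains td none (by simpa using hc)
      simp [hk, hc, hz]
  have h1k : M1.keys = pvAllDurationKeys := by
    simp [PySem.Dict.keys, h1, Function.comp_def]
  have h1c : ∀ k, M1.contains k = decide (k ∈ pvAllDurationKeys) := by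
    intro k; rw [PySem.Dict.contains_eq_decide_mem_keys, h1k]
  set M := dd.items.foldl (fun m p => m.insert p.1 p.2) M1 with hM
  have h2 : M.items = pvAllDurationKeys.map
        (fun k => (k, (dd.get? k).getD (td.getD k none)))
      ++ dd.items.filter (fun p => !(decide (p.1 ∈ pvAllDurationKeys))) := by
    rw [hM, pvMergeItems dd.items M1 hddnd (h1k ▸ (by decide))]
    congr 1
    · rw [h1, List.map_map]
      apply List.map_congr_left
      intro k _
      have : PySem.Dict.mk dd.items = dd := rfl
      simp [this]
    · apply List.filter_congr
      intro p _
      rw [h1c]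
  have hMc : ∀ k ∈ pvAllDurationKeys, M.contains k = true := by
    intro k hk
    rw [PySem.Dict.contains_eq_decide_mem_keys]
    simp only [PySem.Dict.keys, h2, List.map_append, List.map_map]
    simp only [List.mem_append, List.mem_map, Function.comp]
    exact decide_eq_true (Or.inl ⟨k, hk, rfl⟩)
  clear_value M
  clear hM
  -- B's side: the append loop, and its trailing filter as a key-membership test
  rw [pvAppendFresh dd.items _ hddnd]
  simp only [pvAnyMapKey, pvContainsMem]
  rw [pvWinnerEq (fun k => pvTruthy (dd.get? k))]
  simp only [show pvOrderB = pvAllDurationKeys from rfl]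
  set hs := pvTruthy (dd.get? "StartDate") with hhs
  set he := pvTruthy (dd.get? "EndDate") with hhe
  set htf := pvTruthy (dd.get? "TimeFrame") with hhtf
  set hh := pvTruthy (dd.get? "LastNHours") with hhh
  set hd := pvTruthy (dd.get? "LastNDays") with hhd
  by_cases b1 : (hs || he) = true
  · rw [if_pos b1, if_pos b1]
    exact pvBranch td dd M ["LastNDays", "LastNHours", "TimeFrame"] 1 h2 hMc
      (by decide) (by decide)
  · rw [if_neg b1, if_neg b1]
    by_cases b2 : htf = true
    · rw [if_pos b2, if_pos b2]
      exact pvBranch td dd M ["StartDate", "EndDate", "LastNDays", "LastNHours"] 2 h2 hMc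
        (by decide) (by decide)
    · rw [if_neg b2, if_neg b2]
      by_cases b3 : hh = true
      · rw [if_pos b3, if_pos b3]
        exact pvBranch td dd M ["LastNDays", "TimeFrame", "StartDate", "EndDate"] 3 h2 hMc
          (by decide) (by decide)
      · rw [if_neg b3, if_neg b3]
        by_cases b4 : hd = true
        · rw [if_pos b4, if_pos b4]
          exact pvBranch td dd M ["LastNHours", "TimeFrame", "StartDate", "EndDate"] 4 h2 hMc
            (by decide) (by decide)
        · rw [if_neg b4, if_neg b4]
          exact pvBranch td dd M [] 0 h2 hMc (by decide) (by decide)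

-- ===== VERDICT (by name: the statement is the Claim_ definition above) =====
theorem merge_duration_spec : Claim_equal_merge_duration := by
  intro t d _
  unfold Spec_merge_duration
  exact pvMain t d
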